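-- pv_equiv track=rewrite | github.com/andrew-roldugin/encryption-algorithms | task5_1.py | count_trigrams
-- ===== SOURCE A (Python) =====
-- def map_to_reversed_list(d: dict):
--     list_d = list(d.items())
--     list_d.sort(key=lambda i: i[1], reverse=True)
--     return [i[0] for i in list_d]
--
-- def count_trigrams(text):
--     res = {}
--     for i in range(len(text) - 2):
--         if text[i].isalpha() and text[i + 1].isalpha() and text[i + 2].isalpha():
--             trigram = text[i: i + 3]
--             if trigram in res:
--                 res[trigram] += 1
--             else:
--                 res[trigram] = 1
--     return map_to_reversed_list(res)
-- ===== SOURCE B (Python) =====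
-- from itertools import groupby
--
-- def count_trigrams(text):
--     counts = {}
--     for is_alpha, run in groupby(text, key=str.isalpha):
--         if is_alpha:
--             s = ''.join(run)
--             for i in range(len(s) - 2):
--                 tg = s[i:i + 3]
--                 counts[tg] = counts.get(tg, 0) + 1
--     return [t for t, _ in sorted(counts.items(), key=lambda kv: kv[1], reverse=True)]
-- ===== Notes on version B (the rewrite author's own statement) =====
-- stated objective: idiomatic
-- what changed: B segments the text into maximal alphabetic runs (itertools.groupby by str.isalpha) and reads trigrams off each run with a get-default counting dict, instead of A's per-index triple isalpha test with a membership-branched update.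
import Mathlib
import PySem

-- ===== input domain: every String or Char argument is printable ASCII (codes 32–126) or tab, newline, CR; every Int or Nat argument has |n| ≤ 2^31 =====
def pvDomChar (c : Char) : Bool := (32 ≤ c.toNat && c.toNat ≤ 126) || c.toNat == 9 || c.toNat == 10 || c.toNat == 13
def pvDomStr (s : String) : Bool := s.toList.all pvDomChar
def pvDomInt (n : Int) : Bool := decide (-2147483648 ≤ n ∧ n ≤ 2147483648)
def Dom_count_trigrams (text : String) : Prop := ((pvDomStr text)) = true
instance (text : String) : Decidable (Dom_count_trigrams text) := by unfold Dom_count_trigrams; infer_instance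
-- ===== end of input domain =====

-- B replaces A's per-index triple isalpha test by itertools.groupby run-segmentation
-- (trigrams are read off inside each maximal alphabetic run); objective: idiomatic, same cost.

-- ===== PORT A =====
-- helper map_to_reversed_list: sort the dict items by count, descending (stable), keep the keys
def map_to_reversed_list (d : PySem.Dict String Int) : List String :=
  (PySem.List.sorted d.items (fun p => p.2) true).map (fun p => p.1)

-- literal port of A; the loop indices i, i+1, i+2 are always in range, so the
-- `.getD false` totalisation of text[i].isalpha() is never exercised
def count_trigrams (text : String) : List String :=
  let l := text.toList
  let res := (PySem.List.pyRange 0 ((l.length : Int) - 2) 1).foldl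
    (fun (res : PySem.Dict String Int) i =>
      if ((PySem.List.pyGet? l i).map PySem.Chars.isalpha).getD false
         && ((PySem.List.pyGet? l (i + 1)).map PySem.Chars.isalpha).getD false
         && ((PySem.List.pyGet? l (i + 2)).map PySem.Chars.isalpha).getD false then
        let trigram := String.ofList (PySem.List.slice l (some i) (some (i + 3)))
        if res.contains trigram then res.modify trigram 0 (· + 1)
        else res.insert trigram 1
      else res) PySem.Dict.empty
  map_to_reversed_list res

-- ===== PORT B =====
-- itertools.groupby(text, key=str.isalpha): maximal runs of equal key, in order
def pvGroupby : List Char → List (Bool × List Char)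
  | [] => []
  | x :: t =>
    (PySem.Chars.isalpha x,
      x :: t.takeWhile (fun c => PySem.Chars.isalpha c == PySem.Chars.isalpha x)) ::
      pvGroupby (t.dropWhile (fun c => PySem.Chars.isalpha c == PySem.Chars.isalpha x))
termination_by l => l.length
decreasing_by
  exact Nat.lt_succ_of_le (List.length_dropWhile_le _ _)

def count_trigrams_alt (text : String) : List String :=
  let counts := (pvGroupby text.toList).foldl
    (fun (d : PySem.Dict String Int) g =>
      if g.1 then
        (PySem.List.pyRange 0 ((g.2.length : Int) - 2) 1).foldl
          (fun d i =>
            let tg := String.ofList (PySem.List.slice g.2 (some i) (some (i + 3)))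
            d.insert tg (d.getD tg 0 + 1)) d
      else d) PySem.Dict.empty
  (PySem.List.sorted counts.items (fun p => p.2) true).map (fun p => p.1)

-- ===== PRECONDITION & SPEC =====
def Spec_count_trigrams (text : String) (out : List String) : Prop := out = count_trigrams_alt text
instance (text : String) (out : List String) : Decidable (Spec_count_trigrams text out) := by unfold Spec_count_trigrams; infer_instance

-- ===== CLAIM (what is proved, stated in full; the proofs are below) =====
def Claim_equal_count_trigrams : Prop := ∀ (text : String), Dom_count_trigrams text → Spec_count_trigrams text (count_trigrams text)

-- ===== LEMMAS AND PROOFS =====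

-- the common counting step: d[t] = d.get(t, 0) + 1
def pvIncr (d : PySem.Dict String Int) (t : String) : PySem.Dict String Int :=
  d.insert t (d.getD t 0 + 1)

-- A's branched update is pvIncr
theorem pvStepA_eq (d : PySem.Dict String Int) (t : String) :
    (if d.contains t then d.modify t 0 (· + 1) else d.insert t 1) = pvIncr d t := by
  by_cases h : d.contains t
  · simp only [h, if_true]; rfl
  · have h0 : d.getD t 0 = 0 :=
      PySem.Dict.getD_of_not_contains d 0 (by simpa using h)
    simp [h, pvIncr, h0]

-- does a list start with three alphabetic chars?
def pvCond3 : List Char → Bool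
  | a :: b :: c :: _ => PySem.Chars.isalpha a && PySem.Chars.isalpha b && PySem.Chars.isalpha c
  | _ => false

-- trigrams A extracts, as a sliding-window recursion
def trigsRec : List Char → List String
  | a :: b :: c :: t =>
    (if PySem.Chars.isalpha a && PySem.Chars.isalpha b && PySem.Chars.isalpha c
     then [String.ofList [a, b, c]] else []) ++ trigsRec (b :: c :: t)
  | _ => []

-- trigrams B extracts from one run
def winRec : List Char → List String
  | a :: b :: c :: t => String.ofList [a, b, c] :: winRec (b :: c :: t)
  | _ => []

theorem foldl_if_filterMap {α β : Type} (P : β → Bool) (f : β → String)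
    (step : α → String → α) (is : List β) (d : α) :
    is.foldl (fun d i => if P i then step d (f i) else d) d
      = (is.filterMap (fun i => if P i then some (f i) else none)).foldl step d := by
  induction is generalizing d with
  | nil => rfl
  | cons i is ih =>
    by_cases h : P i <;> simp [h, ih]

theorem trigsIdx_eq_trigsRec (l : List Char) :
    (List.range (l.length - 2)).filterMap
        (fun k => if pvCond3 (l.drop k) then some (String.ofList ((l.drop k).take 3)) else none)
      = trigsRec l := by
  match l with
  | [] => rfl
  | [a] => rfl
  | [a, b] => rfl
  | a :: b :: c :: t =>
    have ih := trigsIdx_eq_trigsRec (b :: c :: t)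
    have hlen : (a :: b :: c :: t).length - 2 = t.length + 1 := by simp
    have hlen' : (b :: c :: t).length - 2 = t.length := by simp
    rw [hlen, List.range_succ_eq_map, List.filterMap_cons, List.filterMap_map]
    have hshift : ((fun k => if pvCond3 ((a :: b :: c :: t).drop k) then
          some (String.ofList (((a :: b :: c :: t).drop k).take 3)) else none) ∘ Nat.succ)
        = fun k => if pvCond3 ((b :: c :: t).drop k) then
          some (String.ofList (((b :: c :: t).drop k).take 3)) else none := by
      funext k
      simp [Function.comp, List.drop_succ_cons]
    rw [hshift]
    rw [hlen'] at ih
    rw [ih]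
    by_cases h : (PySem.Chars.isalpha a && PySem.Chars.isalpha b && PySem.Chars.isalpha c) = true
    · have h' : pvCond3 (a :: b :: c :: t) = true := by
        simp [pvCond3, h]
      simp [h', trigsRec, h]
    · have h' : pvCond3 (a :: b :: c :: t) = false := by
        simp only [pvCond3]; simpa using h
      simp [h', trigsRec, h]
termination_by l.length
decreasing_by simp

theorem winIdx_eq_winRec (s : List Char) :
    (List.range (s.length - 2)).map (fun k => String.ofList ((s.drop k).take 3)) = winRec s := by
  match s with
  | [] => rfl
  | [a] => rfl
  | [a, b] => rfl
  | a :: b :: c :: t =>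
    have ih := winIdx_eq_winRec (b :: c :: t)
    have hlen : (a :: b :: c :: t).length - 2 = t.length + 1 := by simp
    have hlen' : (b :: c :: t).length - 2 = t.length := by simp
    rw [hlen, List.range_succ_eq_map, List.map_cons, List.map_map]
    have hshift : ((fun k => String.ofList (((a :: b :: c :: t).drop k).take 3)) ∘ Nat.succ)
        = fun k => String.ofList (((b :: c :: t).drop k).take 3) := by
      funext k; simp [Function.comp, List.drop_succ_cons]
    rw [hshift]
    rw [hlen'] at ih
    rw [ih]
    simp [winRec]
termination_by s.length
decreasing_by simp

-- trigsRec ignores a leading non-alphabetic char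
theorem trigsRec_cons_nonalpha {c : Char} (hc : PySem.Chars.isalpha c = false) (u : List Char) :
    trigsRec (c :: u) = trigsRec u := by
  match u with
  | [] => rfl
  | [b] => rfl
  | b :: d :: t => simp [trigsRec, hc]

-- trigsRec ignores a char right before a non-alphabetic one
theorem trigsRec_cons_cons_nonalpha {y : Char} (hy : PySem.Chars.isalpha y = false)
    (z : Char) (r : List Char) :
    trigsRec (z :: y :: r) = trigsRec (y :: r) := by
  match r with
  | [] => rfl
  | d :: t => simp [trigsRec, hy]

theorem trigsRec_dropWhile_nonalpha (u : List Char) :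
    trigsRec (u.dropWhile (fun c => PySem.Chars.isalpha c == false)) = trigsRec u := by
  induction u with
  | nil => rfl
  | cons c t ih =>
    by_cases h : PySem.Chars.isalpha c = false
    · rw [List.dropWhile_cons_of_pos (by simp [h]), ih, trigsRec_cons_nonalpha h]
    · rw [List.dropWhile_cons_of_neg (by simp [h])]

theorem pvHead?_dropWhile_false (p : Char → Bool) (l : List Char) (y : Char)
    (h : (l.dropWhile p).head? = some y) : p y = false := by
  induction l with
  | nil => simp at h
  | cons a t ih =>
    by_cases ha : p a
    · rw [List.dropWhile_cons_of_pos ha] at h; exact ih h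
    · rw [List.dropWhile_cons_of_neg ha] at h
      simp at h
      subst h
      simpa using ha

-- all-alpha run followed by a non-alpha (or empty) remainder
theorem trigsRec_run_append (run rest : List Char)
    (hrun : ∀ c ∈ run, PySem.Chars.isalpha c = true)
    (hrest : ∀ y, rest.head? = some y → PySem.Chars.isalpha y = false) :
    trigsRec (run ++ rest) = winRec run ++ trigsRec rest := by
  match run with
  | [] => simp [winRec]
  | [a] =>
    cases rest with
    | nil => rfl
    | cons y r =>
      have hy := hrest y rfl
      simp [winRec, trigsRec_cons_cons_nonalpha hy a r]
  | [a, b] =>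
    cases rest with
    | nil => rfl
    | cons y r =>
      have hy := hrest y rfl
      have h1 : trigsRec (a :: b :: y :: r) = trigsRec (b :: y :: r) := by
        simp [trigsRec, hy]
      simp [winRec, h1, trigsRec_cons_cons_nonalpha hy b r]
  | a :: b :: c :: r =>
    have ih := trigsRec_run_append (b :: c :: r) rest
      (fun x hx => hrun x (by simp at hx ⊢; tauto)) hrest
    have ha := hrun a (by simp)
    have hb := hrun b (by simp)
    have hc := hrun c (by simp)
    simp only [List.cons_append] at ih ⊢
    rw [trigsRec, ih]
    simp [winRec, ha, hb, hc]
termination_by run.length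
decreasing_by simp

-- trigsRec over the whole text = the concatenation of per-run window lists, in order
theorem pvMain_runs (n : Nat) : ∀ l : List Char, l.length ≤ n →
    trigsRec l = (pvGroupby l).flatMap (fun g => if g.1 then winRec g.2 else []) := by
  induction n with
  | zero =>
    intro l hl
    have : l = [] := by cases l <;> simp_all
    subst this; simp [pvGroupby, trigsRec]
  | succ n ih =>
    intro l hl
    match l with
    | [] => simp [pvGroupby, trigsRec]
    | x :: t =>
      rw [pvGroupby]
      by_cases hx : PySem.Chars.isalpha x = true
      · have hdrop := ih (t.dropWhile (fun c => PySem.Chars.isalpha c == PySem.Chars.isalpha x))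
          (le_trans (List.length_dropWhile_le _ _) (by simpa using hl))
        have hsplit : x :: t
            = (x :: t.takeWhile (fun c => PySem.Chars.isalpha c == PySem.Chars.isalpha x))
              ++ t.dropWhile (fun c => PySem.Chars.isalpha c == PySem.Chars.isalpha x) := by
          simp [List.takeWhile_append_dropWhile]
        have hrun : ∀ c ∈ x :: t.takeWhile (fun c => PySem.Chars.isalpha c == PySem.Chars.isalpha x),
            PySem.Chars.isalpha c = true := by
          intro c hc
          rcases List.mem_cons.mp hc with h | h
          · subst h; exact hx
          · have := List.mem_takeWhile_imp h
            simp [hx] at this; exact this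
        have hrest : ∀ y, (t.dropWhile (fun c => PySem.Chars.isalpha c == PySem.Chars.isalpha x)).head?
            = some y → PySem.Chars.isalpha y = false := by
          intro y hy
          have := pvHead?_dropWhile_false _ _ _ hy
          simp [hx] at this; exact this
        calc trigsRec (x :: t)
            = trigsRec ((x :: t.takeWhile (fun c => PySem.Chars.isalpha c == PySem.Chars.isalpha x))
              ++ t.dropWhile (fun c => PySem.Chars.isalpha c == PySem.Chars.isalpha x)) := by rw [← hsplit]
          _ = winRec (x :: t.takeWhile (fun c => PySem.Chars.isalpha c == PySem.Chars.isalpha x))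
              ++ trigsRec (t.dropWhile (fun c => PySem.Chars.isalpha c == PySem.Chars.isalpha x)) :=
            trigsRec_run_append _ _ hrun hrest
          _ = _ := by
            rw [hdrop, List.flatMap_cons, hx]
            simp
      · have hx' : PySem.Chars.isalpha x = false := by simpa using hx
        have hdrop := ih (t.dropWhile (fun c => PySem.Chars.isalpha c == PySem.Chars.isalpha x))
          (le_trans (List.length_dropWhile_le _ _) (by simpa using hl))
        rw [hx'] at hdrop
        rw [List.flatMap_cons, hx']
        simp only [Bool.false_eq_true, if_false, List.nil_append]
        rw [← hdrop, trigsRec_cons_nonalpha hx']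
        exact (trigsRec_dropWhile_nonalpha t).symm

-- Int-side bridges
theorem pvPyRange_window (m : Nat) :
    PySem.List.pyRange 0 ((m : Int) - 2) 1 = (List.range (m - 2)).map (fun (k : Nat) => (k : Int)) := by
  rw [PySem.List.pyRange_one]
  have h : (((m : Int) - 2) - 0).toNat = m - 2 := by omega
  rw [h]
  exact List.map_congr_left (by intro k _; simp)

theorem pvSlice_window (u : List Char) (k : Nat) :
    PySem.List.slice u (some (k : Int)) (some ((k : Int) + 3)) = (u.drop k).take 3 := by
  have h : ((k : Int) + 3) = ((k + 3 : Nat) : Int) := by push_cast; ring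
  rw [h, PySem.List.slice_natCast]
  congr 1
  omega

theorem pvCond_bridge (l : List Char) (k : Nat) :
    (((PySem.List.pyGet? l (k : Int)).map PySem.Chars.isalpha).getD false
      && ((PySem.List.pyGet? l ((k : Int) + 1)).map PySem.Chars.isalpha).getD false
      && ((PySem.List.pyGet? l ((k : Int) + 2)).map PySem.Chars.isalpha).getD false)
      = pvCond3 (l.drop k) := by
  have e1 : ((k : Int) + 1) = ((k + 1 : Nat) : Int) := by push_cast; ring
  have e2 : ((k : Int) + 2) = ((k + 2 : Nat) : Int) := by push_cast; ring
  rw [e1, e2, PySem.List.pyGet?_natCast, PySem.List.pyGet?_natCast, PySem.List.pyGet?_natCast]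
  have d0 : l[k]? = (l.drop k)[0]? := by simp [List.getElem?_drop]
  have d1 : l[k + 1]? = (l.drop k)[1]? := by simp [List.getElem?_drop]
  have d2 : l[k + 2]? = (l.drop k)[2]? := by simp [List.getElem?_drop]
  rw [d0, d1, d2]
  match (l.drop k) with
  | [] => rfl
  | [a] => simp [pvCond3]
  | [a, b] => simp [pvCond3]
  | a :: b :: c :: t => simp [pvCond3]

-- A's dict is the pvIncr-fold over trigsRec
theorem pvDictA (l : List Char) :
    ((PySem.List.pyRange 0 ((l.length : Int) - 2) 1).foldl
      (fun (res : PySem.Dict String Int) i =>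
        if ((PySem.List.pyGet? l i).map PySem.Chars.isalpha).getD false
           && ((PySem.List.pyGet? l (i + 1)).map PySem.Chars.isalpha).getD false
           && ((PySem.List.pyGet? l (i + 2)).map PySem.Chars.isalpha).getD false then
          let trigram := String.ofList (PySem.List.slice l (some i) (some (i + 3)))
          if res.contains trigram then res.modify trigram 0 (· + 1)
          else res.insert trigram 1
        else res) PySem.Dict.empty)
      = (trigsRec l).foldl pvIncr PySem.Dict.empty := by
  rw [pvPyRange_window, List.foldl_map]
  refine Eq.trans (PySem.List.foldl_congr_mem _ _
      (fun (d : PySem.Dict String Int) (k : Nat) =>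
        if pvCond3 (l.drop k) then pvIncr d (String.ofList ((l.drop k).take 3)) else d)
      PySem.Dict.empty ?_) ?_
  · intro d k _
    simp only [pvCond_bridge, pvSlice_window]
    by_cases h : pvCond3 (l.drop k)
    · simp only [h, if_true]
      exact pvStepA_eq d _
    · simp [h]
  · rw [foldl_if_filterMap (fun k => pvCond3 (l.drop k))
      (fun k => String.ofList ((l.drop k).take 3)) pvIncr]
    rw [trigsIdx_eq_trigsRec]

-- B's dict is the pvIncr-fold over the flattened run windows
theorem pvDictB (gs : List (Bool × List Char)) (d : PySem.Dict String Int) :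
    gs.foldl (fun (d : PySem.Dict String Int) g =>
      if g.1 then
        (PySem.List.pyRange 0 ((g.2.length : Int) - 2) 1).foldl
          (fun d i =>
            let tg := String.ofList (PySem.List.slice g.2 (some i) (some (i + 3)))
            d.insert tg (d.getD tg 0 + 1)) d
      else d) d
    = (gs.flatMap (fun g => if g.1 then winRec g.2 else [])).foldl pvIncr d := by
  induction gs generalizing d with
  | nil => rfl
  | cons g gs ih =>
    rw [List.foldl_cons, List.flatMap_cons, List.foldl_append]
    by_cases hg : g.1
    · simp only [hg, if_true]
      rw [ih]
      congr 1
      rw [pvPyRange_window, List.foldl_map]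
      refine Eq.trans (PySem.List.foldl_congr_mem _ _
          (fun (d : PySem.Dict String Int) (k : Nat) =>
            pvIncr d (String.ofList ((g.2.drop k).take 3))) d ?_) ?_
      · intro d k _
        simp only [pvSlice_window]
        rfl
      · rw [← List.foldl_map, winIdx_eq_winRec]
    · simp [hg, ih]

theorem count_trigrams_spec : Claim_equal_count_trigrams := by
  intro text _
  unfold Spec_count_trigrams count_trigrams count_trigrams_alt map_to_reversed_list
  simp only []
  rw [pvDictA, pvDictB, ← pvMain_runs text.toList.length text.toList le_rfl]
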